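-- pv_equiv track=rewrite | github.com/rbtkhn/grace-mar | scripts/validate_strategy_expert_threads.py | strategy_page_fence_word_count
-- ===== SOURCE A (Python) =====
-- def strategy_page_fence_word_count(body: str) -> int:
--     """Words inside ``<!-- strategy-page:start`` … ``end`` --> blocks (thread-embedded pages)."""
--     n = 0
--     pos = 0
--     while True:
--         start = body.find("<!-- strategy-page:start", pos)
--         if start == -1:
--             break
--         end = body.find("<!-- strategy-page:end", start)
--         if end == -1:
--             break
--         chunk = body[start:end]
--         n += len(chunk.split())
--         pos = end + 1
--     return n
-- ===== SOURCE B (Python) =====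
-- def strategy_page_fence_word_count(body: str) -> int:
--     """Words inside ``<!-- strategy-page:start`` … ``end`` --> blocks (thread-embedded pages)."""
--     total = 0
--     for seg in body.split("<!-- strategy-page:end")[:-1]:
--         i = seg.find("<!-- strategy-page:start")
--         if i != -1:
--             total += len(seg[i:].split())
--     return total
-- ===== Notes on version B (the rewrite author's own statement) =====
-- stated objective: simpler
-- what changed: Instead of A's stateful while-loop that repeatedly calls find for the start and end markers and advances an absolute position, B splits the body once on the end marker and, for each segment except the last, counts the words from the first start marker to the segment's end.
import Mathlib
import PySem

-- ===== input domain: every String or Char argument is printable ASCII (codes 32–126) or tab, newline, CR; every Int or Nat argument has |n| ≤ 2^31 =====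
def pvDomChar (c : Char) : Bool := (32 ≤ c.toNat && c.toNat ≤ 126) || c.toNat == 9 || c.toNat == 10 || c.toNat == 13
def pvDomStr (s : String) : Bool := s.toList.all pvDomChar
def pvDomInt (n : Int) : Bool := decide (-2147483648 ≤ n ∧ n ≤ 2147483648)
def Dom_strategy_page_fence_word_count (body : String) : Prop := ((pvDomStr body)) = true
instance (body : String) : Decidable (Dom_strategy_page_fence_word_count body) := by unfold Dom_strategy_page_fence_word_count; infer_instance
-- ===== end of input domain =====

-- B replaces A's while-loop of repeated find calls with a single split on the end marker plus a
-- per-segment word count (objective: simpler); the return values are proved equal on all inputs.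

-- ===== PORT A =====
def pvStart : List Char := "<!-- strategy-page:start".toList
def pvEnd : List Char := "<!-- strategy-page:end".toList

-- occurrence gives infix
-- the 'while True' loop of A: state (pos, n); the fuel bounds the iteration count (pos strictly increases)
def pvAGo (cs : List Char) : Nat → Int → Int → Int
  | 0, _, n => n
  | fuel+1, pos, n =>
    let start := PySem.Chars.findFrom cs pvStart pos none
    if start = -1 then n
    else
      let e := PySem.Chars.findFrom cs pvEnd start none
      if e = -1 then n
      else pvAGo cs fuel (e + 1)
        (n + ((PySem.Chars.split₀ (PySem.List.slice cs (some start) (some e))).length : Int))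

def strategy_page_fence_word_count (body : String) : Int :=
  pvAGo body.toList (body.toList.length + 1) 0 0

-- ===== PORT B =====
-- body of B's for-loop: total += len(seg[i:].split()) when the start marker occurs in seg
def pvSegWords (t : Int) (seg : List Char) : Int :=
  let i := PySem.Chars.find seg pvStart
  if i = -1 then t
  else t + ((PySem.Chars.split₀ (PySem.List.slice seg (some i) none)).length : Int)

def strategy_page_fence_word_count_alt (body : String) : Int :=
  (PySem.List.slice (PySem.Chars.splitOn body.toList pvEnd) none (some (-1))).foldl pvSegWords 0

-- ===== PRECONDITION & SPEC =====
def Spec_strategy_page_fence_word_count (body : String) (out : Int) : Prop := out = strategy_page_fence_word_count_alt body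
instance (body : String) (out : Int) : Decidable (Spec_strategy_page_fence_word_count body out) := by unfold Spec_strategy_page_fence_word_count; infer_instance

-- ===== CLAIM (what is proved, stated in full; the proofs are below) =====
def Claim_equal_strategy_page_fence_word_count : Prop := ∀ (body : String), Dom_strategy_page_fence_word_count body → Spec_strategy_page_fence_word_count body (strategy_page_fence_word_count body)

-- ===== LEMMAS AND PROOFS =====

lemma pv_infix_of_occ {sub s : List Char} {j : Nat} (h : sub <+: s.drop j) : sub <:+: s :=
  h.isInfix.trans (List.drop_suffix j s).isInfix

lemma pv_infix_iff_occ (sub s : List Char) : sub <:+: s ↔ ∃ j, sub <+: s.drop j := by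
  constructor
  · intro h
    exact (PySem.Chars.exists_prefix_drop_iff_isIn sub s).mpr ((PySem.Chars.isIn_iff_infix sub s).mpr h)
  · rintro ⟨j, hj⟩; exact pv_infix_of_occ hj

-- find = m from occurrence + minimality
lemma pv_find_eq {s sub : List Char} {m : Nat} (hocc : sub <+: s.drop m)
    (hmin : ∀ j, j < m → ¬ sub <+: s.drop j) : PySem.Chars.find s sub = (m : Int) := by
  have hnn : 0 ≤ PySem.Chars.find s sub :=
    (PySem.Chars.find_nonneg_iff s sub).mpr (pv_infix_of_occ hocc)
  obtain ⟨h1, h2⟩ := PySem.Chars.find_spec hnn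
  rcases lt_trichotomy (PySem.Chars.find s sub).toNat m with h | h | h
  · exact absurd h1 (hmin _ h)
  · omega
  · exact absurd hocc (h2 m h)

-- character reading through a prefix occurrence
lemma pv_occ_getElem {sub s : List Char} {j k : Nat} (h : sub <+: s.drop j) (hk : k < sub.length) :
    s[j + k]? = some (sub[k]) := by
  obtain ⟨r, hr⟩ := h
  rw [← List.getElem?_drop, ← hr, List.getElem?_append_left hk, List.getElem?_eq_getElem hk]

-- two '<'-headed markers cannot properly overlap when the earlier one has '<' only at position 0
lemma pv_no_overlap {p q s : List Char} {a b : Nat}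
    (hp : p <+: s.drop a) (hq : q <+: s.drop b)
    (hab : a < b) (hb : b < a + p.length)
    (hq0 : 0 < q.length) (hq0' : q[0]'hq0 = '<')
    (hplt : ∀ (j : Nat) (hj : j < p.length), 0 < j → p[j]'hj ≠ '<') : False := by
  have e1 : s[b + 0]? = some (q[0]'hq0) := pv_occ_getElem hq hq0
  have hba : b - a < p.length := by omega
  have e2 : s[a + (b - a)]? = some (p[b - a]'hba) := pv_occ_getElem hp hba
  have hab' : a + (b - a) = b + 0 := by omega
  rw [hab'] at e2
  have : p[b - a]'hba = '<' := by
    rw [e2] at e1; injection e1 with h; rw [h, hq0']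
  exact hplt _ hba (by omega) this

-- occurrences inside a take are occurrences
lemma pv_occ_of_take {sub s : List Char} {m j : Nat} (h : sub <+: (s.take m).drop j) :
    sub <+: s.drop j := by
  rw [List.drop_take] at h
  exact ((List.prefix_take_iff).mp h).1

-- pvStart chars: '<' only at 0; pvEnd chars: '<' only at 0
lemma pv_start_lt : ∀ (j : Nat) (hj : j < pvStart.length), 0 < j → pvStart[j]'hj ≠ '<' := by decide
lemma pv_end_lt : ∀ (j : Nat) (hj : j < pvEnd.length), 0 < j → pvEnd[j]'hj ≠ '<' := by decide

def pvG (s : List Char) : Int :=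
  if hi : PySem.Chars.find s pvStart = -1 then 0
  else if PySem.Chars.findFrom s pvEnd (PySem.Chars.find s pvStart) none = -1 then 0
  else ((PySem.Chars.split₀
          ((s.drop (PySem.Chars.find s pvStart).toNat).take
            ((PySem.Chars.findFrom s pvEnd (PySem.Chars.find s pvStart) none).toNat
              - (PySem.Chars.find s pvStart).toNat))).length : Int)
       + pvG (s.drop ((PySem.Chars.findFrom s pvEnd (PySem.Chars.find s pvStart) none).toNat + 1))
  termination_by s.length
  decreasing_by
    have h1 : pvStart <:+: s := (PySem.Chars.find_ne_neg_one_iff s pvStart).mp hi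
    have h2 : 24 ≤ s.length := by
      have := h1.length_le
      simpa [pvStart] using this
    simp only [List.length_drop]
    omega

lemma pvG_zero₁ {s : List Char} (h : PySem.Chars.find s pvStart = -1) : pvG s = 0 := by
  rw [pvG]; simp [h]

lemma pvG_zero₂ {s : List Char} (h : PySem.Chars.findFrom s pvEnd (PySem.Chars.find s pvStart) none = -1) :
    pvG s = 0 := by
  rw [pvG]
  by_cases h1 : PySem.Chars.find s pvStart = -1 <;> simp [h1, h]

lemma pvG_step {s : List Char} {iN jN : Nat}
    (h1 : PySem.Chars.find s pvStart = (iN : Int))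
    (h2 : PySem.Chars.findFrom s pvEnd ((iN : Nat) : Int) none = ((iN + jN : Nat) : Int)) :
    pvG s = ((PySem.Chars.split₀ ((s.drop iN).take jN)).length : Int) + pvG (s.drop (iN + jN + 1)) := by
  rw [pvG]
  rw [dif_neg (by rw [h1]; omega)]
  rw [h1, h2]
  rw [if_neg (by omega)]
  simp only [Int.toNat_natCast, Nat.add_sub_cancel_left]

lemma pv_findFrom_eq {s : List Char} {iN jN : Nat} (hiN : iN ≤ s.length)
    (hocc : pvEnd <+: (s.drop iN).drop jN) (hmin : ∀ j, j < jN → ¬ pvEnd <+: (s.drop iN).drop j) :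
    PySem.Chars.findFrom s pvEnd ((iN : Nat) : Int) none = ((iN + jN : Nat) : Int) := by
  rw [PySem.Chars.findFrom_natCast s pvEnd iN hiN]
  rw [pv_find_eq hocc hmin]
  rw [if_neg (by omega)]
  push_cast; ring

lemma pv_findFrom_neg {s : List Char} {iN : Nat} (hiN : iN ≤ s.length)
    (hno : ¬ pvEnd <:+: s.drop iN) :
    PySem.Chars.findFrom s pvEnd ((iN : Nat) : Int) none = -1 :=
  (PySem.Chars.findFrom_natCast_eq_neg_one_iff s pvEnd iN hiN).mpr hno

lemma pv_G_drop (s : List Char) (m : Nat) (hm : m ≤ s.length)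
    (hno : ∀ j, j < m → ¬ pvStart <+: s.drop j) : pvG s = pvG (s.drop m) := by
  by_cases hfind : PySem.Chars.find s pvStart = -1
  · have hfind2 : PySem.Chars.find (s.drop m) pvStart = -1 := by
      rw [PySem.Chars.find_eq_neg_one_iff] at hfind ⊢
      intro h; apply hfind
      obtain ⟨j, hj⟩ := (pv_infix_iff_occ _ _).mp h
      rw [List.drop_drop] at hj
      exact pv_infix_of_occ hj
    rw [pvG_zero₁ hfind, pvG_zero₁ hfind2]
  · have hnn : 0 ≤ PySem.Chars.find s pvStart :=
      (PySem.Chars.find_nonneg_iff s pvStart).mpr ((PySem.Chars.find_ne_neg_one_iff s pvStart).mp hfind)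
    obtain ⟨hocc, hmin⟩ := PySem.Chars.find_spec hnn
    set iN := (PySem.Chars.find s pvStart).toNat with hiN
    have hIm : m ≤ iN := by
      by_contra h
      exact hno iN (by omega) hocc
    have hfind_eq : PySem.Chars.find s pvStart = (iN : Int) := (Int.toNat_of_nonneg hnn).symm
    have hocc2 : pvStart <+: (s.drop m).drop (iN - m) := by
      rw [List.drop_drop]
      have h : m + (iN - m) = iN := by omega
      rw [h]; exact hocc
    have hmin2 : ∀ j, j < iN - m → ¬ pvStart <+: (s.drop m).drop j := by
      intro j hj
      rw [List.drop_drop]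
      exact hmin _ (by omega)
    have hfind2 : PySem.Chars.find (s.drop m) pvStart = ((iN - m : Nat) : Int) :=
      pv_find_eq hocc2 hmin2
    have hilen : iN ≤ s.length := by
      have := PySem.Chars.find_le_length s pvStart; omega
    have hdd : (s.drop m).drop (iN - m) = s.drop iN := by
      rw [List.drop_drop]; congr 1; omega
    by_cases hinf : pvEnd <:+: s.drop iN
    · -- end marker follows: both sides take a step with the same data
      obtain ⟨jN, hjocc, hjmin⟩ : ∃ jN, pvEnd <+: (s.drop iN).drop jN ∧
          ∀ j, j < jN → ¬ pvEnd <+: (s.drop iN).drop j := by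
        have hnn' : 0 ≤ PySem.Chars.find (s.drop iN) pvEnd :=
          (PySem.Chars.find_nonneg_iff _ _).mpr hinf
        obtain ⟨a, b⟩ := PySem.Chars.find_spec hnn'
        exact ⟨_, a, b⟩
      have hstep1 : pvG s = ((PySem.Chars.split₀ ((s.drop iN).take jN)).length : Int)
          + pvG (s.drop (iN + jN + 1)) := by
        refine pvG_step hfind_eq (pv_findFrom_eq hilen hjocc hjmin)
      have hjocc2 : pvEnd <+: ((s.drop m).drop (iN - m)).drop jN := by rw [hdd]; exact hjocc
      have hjmin2 : ∀ j, j < jN → ¬ pvEnd <+: ((s.drop m).drop (iN - m)).drop j := by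
        rw [hdd]; exact hjmin
      have hstep2 : pvG (s.drop m) = ((PySem.Chars.split₀ (((s.drop m).drop (iN - m)).take jN)).length : Int)
          + pvG ((s.drop m).drop ((iN - m) + jN + 1)) := by
        refine pvG_step hfind2 (pv_findFrom_eq (by simp only [List.length_drop]; omega) hjocc2 hjmin2)
      rw [hstep1, hstep2, hdd]
      have harg : (s.drop m).drop (iN - m + jN + 1) = s.drop (iN + jN + 1) := by
        rw [List.drop_drop]; congr 1; omega
      rw [harg]
    · -- no end marker after the start: both sides are 0
      have hz1 : pvG s = 0 := by
        apply pvG_zero₂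
        rw [hfind_eq]
        exact pv_findFrom_neg hilen hinf
      have hz2 : pvG (s.drop m) = 0 := by
        apply pvG_zero₂
        rw [hfind2]
        have := pv_findFrom_neg (s := s.drop m) (iN := iN - m)
          (by simp only [List.length_drop]; omega) (by rw [hdd]; exact hinf)
        exact this
      rw [hz1, hz2]

def pvSplitRec (s : List Char) : List (List Char) :=
  if pvEnd <+: s then
    match s with
    | [] => [[]]
    | _ :: r => [] :: pvSplitRec (r.drop 21)
  else
    match s with
    | [] => [[]]
    | c :: r =>
      match pvSplitRec r with
      | [] => [[c]]
      | h :: t => (c :: h) :: t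
  termination_by s.length
  decreasing_by
    · simp only [List.length_drop, List.length_cons]; omega
    · simp only [List.length_cons]; omega

lemma pvSplitRec_ne_nil (s : List Char) : pvSplitRec s ≠ [] := by
  unfold pvSplitRec
  split_ifs with h
  · cases s <;> simp
  · cases s with
    | nil => simp
    | cons c r =>
      simp only []
      split <;> simp

def pvConsHead (x : List Char) (ls : List (List Char)) : List (List Char) :=
  match ls with
  | [] => [x]
  | h :: t => (x ++ h) :: t

lemma pvConsHead_nil {X : List (List Char)} (h : X ≠ []) : pvConsHead [] X = X := by
  cases X with
  | nil => exact absurd rfl h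
  | cons a t => simp [pvConsHead]

lemma pv_go (fuel : Nat) (l cur : List Char) (acc : List (List Char)) (hf : l.length < fuel) :
    PySem.Chars.splitOn.go pvEnd fuel l cur acc = acc.reverse ++ pvConsHead cur.reverse (pvSplitRec l) := by
  induction fuel generalizing l cur acc with
  | zero => omega
  | succ f ih =>
    cases l with
    | nil =>
      rw [PySem.Chars.splitOn.go.eq_def]
      have hsr : pvSplitRec [] = [[]] := by
        rw [pvSplitRec]
        rw [if_neg (by simp [pvEnd])]
      rw [hsr]
      simp [pvConsHead]
    | cons c rest =>
      rw [PySem.Chars.splitOn.go.eq_def]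
      simp only []
      by_cases hp : pvEnd.isPrefixOf (c :: rest) = true
      · rw [if_pos hp]
        have hdrop : (c :: rest).drop pvEnd.length = rest.drop 21 := by
          show (c :: rest).drop 22 = rest.drop 21
          simp [List.drop_succ_cons]
        rw [hdrop]
        rw [ih (rest.drop 21) [] (cur.reverse :: acc) (by simp only [List.length_drop]; simp at hf ⊢; omega)]
        have hsr : pvSplitRec (c :: rest) = [] :: pvSplitRec (rest.drop 21) := by
          rw [pvSplitRec]
          rw [if_pos (List.isPrefixOf_iff_prefix.mp hp)]
        rw [hsr]
        simp only [List.reverse_nil]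
        rw [pvConsHead_nil (pvSplitRec_ne_nil _)]
        simp [pvConsHead]
      · rw [if_neg hp]
        rw [ih rest (c :: cur) acc (by simp at hf ⊢; omega)]
        have hne := pvSplitRec_ne_nil rest
        obtain ⟨h, t, hht⟩ : ∃ h t, pvSplitRec rest = h :: t := by
          cases hrest : pvSplitRec rest with
          | nil => exact absurd hrest hne
          | cons a b => exact ⟨a, b, rfl⟩
        have hsr : pvSplitRec (c :: rest) = (c :: h) :: t := by
          rw [pvSplitRec]
          rw [if_neg (fun hpre => hp (List.isPrefixOf_iff_prefix.mpr hpre))]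
          simp only [hht]
        rw [hsr, hht]
        simp [pvConsHead]

lemma pv_splitOn_eq (s : List Char) :
    PySem.Chars.splitOn s pvEnd = pvSplitRec s := by
  show PySem.Chars.splitOn.go pvEnd (s.length + 1) s [] [] = _
  rw [pv_go _ _ _ _ (by omega)]
  simp [pvConsHead_nil (pvSplitRec_ne_nil s)]

lemma pv_splitRec_no {s : List Char} (h : ¬ pvEnd <:+: s) : pvSplitRec s = [s] := by
  induction s with
  | nil =>
    rw [pvSplitRec]
    rw [if_neg (by simp [pvEnd])]
  | cons c r ih =>
    rw [pvSplitRec]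
    rw [if_neg (fun hp => h hp.isInfix)]
    have hr : ¬ pvEnd <:+: r := fun hin => h (hin.trans (List.suffix_cons c r).isInfix)
    simp only [ih hr]

lemma pv_splitRec_occ {s : List Char} {k : Nat} (hocc : pvEnd <+: s.drop k)
    (hmin : ∀ j, j < k → ¬ pvEnd <+: s.drop j) :
    pvSplitRec s = s.take k :: pvSplitRec (s.drop (k + 22)) := by
  induction k generalizing s with
  | zero =>
    simp only [List.drop_zero] at hocc
    cases s with
    | nil =>
      exfalso
      have := hocc.length_le
      simp [pvEnd] at this
    | cons c r =>
      rw [pvSplitRec]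
      rw [if_pos hocc]
      simp [List.drop_succ_cons]
  | succ k ih =>
    cases s with
    | nil =>
      exfalso
      simp only [List.drop_nil] at hocc
      have := hocc.length_le
      simp [pvEnd] at this
    | cons c r =>
      rw [pvSplitRec]
      rw [if_neg (by simpa using hmin 0 (by omega))]
      have hocc' : pvEnd <+: r.drop k := hocc
      have hmin' : ∀ j, j < k → ¬ pvEnd <+: r.drop j := fun j hj => hmin (j + 1) (by omega)
      simp only [ih hocc' hmin', List.take_succ_cons]
      have : k + 1 + 22 = (k + 22) + 1 := by omega
      rw [this, List.drop_succ_cons]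

lemma pvSegWords_shift (t : Int) (a : List Char) : pvSegWords t a = t + pvSegWords 0 a := by
  unfold pvSegWords
  by_cases h : PySem.Chars.find a pvStart = -1 <;> simp [h]

lemma pv_foldl_shift (segs : List (List Char)) (t : Int) :
    segs.foldl pvSegWords t = t + segs.foldl pvSegWords 0 := by
  induction segs generalizing t with
  | nil => simp
  | cons a l ih =>
    simp only [List.foldl_cons]
    rw [ih (pvSegWords t a), ih (pvSegWords 0 a), pvSegWords_shift]
    ring

lemma pv_take_no_start {s : List Char} {k : Nat}
    (h : ∀ j, pvStart <+: s.drop j → ¬ j < k) :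
    PySem.Chars.find (s.take k) pvStart = -1 := by
  rw [PySem.Chars.find_eq_neg_one_iff]
  intro hinf
  obtain ⟨j, hj⟩ := (pv_infix_iff_occ _ _).mp hinf
  have hs : pvStart <+: s.drop j := pv_occ_of_take hj
  have hlen := hj.length_le
  simp only [List.length_drop, List.length_take, pvStart] at hlen
  have h24 : (24 : Nat) ≤ min k s.length - j := by simpa using hlen
  exact h j hs (by omega)

lemma pv_main (n : Nat) (s : List Char) (hn : s.length ≤ n) :
    pvG s = ((pvSplitRec s).dropLast).foldl pvSegWords 0 := by
  induction n generalizing s with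
  | zero =>
    have hs : s = [] := by
      cases s with
      | nil => rfl
      | cons a l => simp at hn
    subst hs
    have h1 : PySem.Chars.find ([] : List Char) pvStart = -1 := by
      rw [PySem.Chars.find_eq_neg_one_iff]
      intro h
      have := h.length_le
      simp [pvStart] at this
    rw [pvG_zero₁ h1]
    have h2 : pvSplitRec [] = [[]] := by
      rw [pvSplitRec]
      rw [if_neg (by simp [pvEnd])]
    rw [h2]
    simp
  | succ n ih =>
    by_cases hE : pvEnd <:+: s
    · -- there is an end marker: first one at k
      have hknn : 0 ≤ PySem.Chars.find s pvEnd := (PySem.Chars.find_nonneg_iff s pvEnd).mpr hE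
      obtain ⟨kocc, kmin⟩ := PySem.Chars.find_spec hknn
      set k := (PySem.Chars.find s pvEnd).toNat with hk
      have hklen : k ≤ s.length := by
        have := PySem.Chars.find_le_length s pvEnd; omega
      have h22 : k + 22 ≤ s.length := by
        have := kocc.length_le
        simp only [List.length_drop, pvEnd] at this
        have h22' : (22 : Nat) ≤ s.length - k := by simpa using this
        omega
      have hsplit : pvSplitRec s = s.take k :: pvSplitRec (s.drop (k + 22)) :=
        pv_splitRec_occ kocc kmin
      set t := s.drop (k + 22) with ht
      have htlen : t.length ≤ n := by
        simp only [ht, List.length_drop]; omega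
      have hdl : (pvSplitRec s).dropLast = s.take k :: (pvSplitRec t).dropLast := by
        rw [hsplit, List.dropLast_cons_of_ne_nil (pvSplitRec_ne_nil t)]
      have hIH : pvG t = ((pvSplitRec t).dropLast).foldl pvSegWords 0 := ih t htlen
      rw [hdl]
      simp only [List.foldl_cons]
      rw [pv_foldl_shift]
      by_cases hfind : PySem.Chars.find s pvStart = -1
      · -- no start marker anywhere: everything is 0
        have hnoS : ¬ pvStart <:+: s := (PySem.Chars.find_eq_neg_one_iff s pvStart).mp hfind
        have hseg : pvSegWords 0 (s.take k) = 0 := by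
          unfold pvSegWords
          rw [pv_take_no_start (fun j hj _ => hnoS (pv_infix_of_occ hj))]
          simp
        have hGt : pvG t = 0 := by
          apply pvG_zero₁
          rw [PySem.Chars.find_eq_neg_one_iff]
          intro hinf
          obtain ⟨j, hj⟩ := (pv_infix_iff_occ _ _).mp hinf
          rw [ht, List.drop_drop] at hj
          exact hnoS (pv_infix_of_occ hj)
        rw [pvG_zero₁ hfind, hseg, ← hIH, hGt]
        simp
      · -- start marker at iN
        have hinn : 0 ≤ PySem.Chars.find s pvStart :=
          (PySem.Chars.find_nonneg_iff s pvStart).mpr ((PySem.Chars.find_ne_neg_one_iff s pvStart).mp hfind)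
        obtain ⟨iocc, imin⟩ := PySem.Chars.find_spec hinn
        set iN := (PySem.Chars.find s pvStart).toNat with hiN
        have hfeq : PySem.Chars.find s pvStart = (iN : Int) := (Int.toNat_of_nonneg hinn).symm
        have hilen : iN ≤ s.length := by
          have := PySem.Chars.find_le_length s pvStart; omega
        have hne : iN ≠ k := by
          intro h
          have e1 : s[iN + 19]? = some (pvStart[19]'(by simp [pvStart])) := pv_occ_getElem iocc (by simp [pvStart])
          have e2 : s[k + 19]? = some (pvEnd[19]'(by simp [pvEnd])) := pv_occ_getElem kocc (by simp [pvEnd])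
          rw [h] at e1
          rw [e2] at e1
          injection e1 with e3
          simp [pvStart, pvEnd] at e3
        rcases Nat.lt_or_ge iN k with hik | hik
        · -- start before first end: A counts this block, and so does segment (s.take k)
          have h24 : iN + 24 ≤ k := by
            by_contra hcon
            exact pv_no_overlap iocc kocc hik
              (by simp only [pvStart]; simp; omega)
              (by simp [pvEnd]) (by decide) pv_start_lt
          -- the first end marker at/after iN is exactly k
          have hffeq : PySem.Chars.findFrom s pvEnd ((iN : Nat) : Int) none = ((iN + (k - iN) : Nat) : Int) := by
            apply pv_findFrom_eq hilen
            · rw [List.drop_drop]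
              have : iN + (k - iN) = k := by omega
              rw [this]; exact kocc
            · intro j hj
              rw [List.drop_drop]
              exact kmin _ (by omega)
          have hstep : pvG s = ((PySem.Chars.split₀ ((s.drop iN).take (k - iN))).length : Int)
              + pvG (s.drop (iN + (k - iN) + 1)) := pvG_step hfeq hffeq
          have harg : iN + (k - iN) + 1 = k + 1 := by omega
          rw [harg] at hstep
          -- dropping past the rest of the end marker does not change pvG
          have hshift : pvG (s.drop (k + 1)) = pvG t := by
            have hdd : (s.drop (k + 1)).drop 21 = t := by
              rw [ht, List.drop_drop]
            rw [← hdd]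
            apply pv_G_drop
            · simp only [List.length_drop]; omega
            · intro j hj hocc
              rw [List.drop_drop] at hocc
              exact pv_no_overlap kocc hocc (by omega)
                (by simp only [pvEnd]; simp; omega)
                (by simp [pvStart]) (by decide) pv_end_lt
          -- the segment's word count
          have hsegfind : PySem.Chars.find (s.take k) pvStart = (iN : Int) := by
            apply pv_find_eq (m := iN)
            · rw [List.drop_take]
              apply (List.prefix_take_iff).mpr
              refine ⟨iocc, ?_⟩
              simp only [pvStart]; simp; omega
            · intro j hj hocc
              exact imin j hj (pv_occ_of_take hocc)
          have hseg : pvSegWords 0 (s.take k) = ((PySem.Chars.split₀ ((s.drop iN).take (k - iN))).length : Int) := by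
            unfold pvSegWords
            rw [hsegfind]
            rw [if_neg (by omega)]
            rw [PySem.List.slice_from_natCast]
            rw [List.drop_take]
            simp
          rw [hstep, hshift, hIH, hseg]
        · -- first start only after the first end: segment (s.take k) counts nothing
          have h22' : k + 22 ≤ iN := by
            rcases Nat.lt_or_ge iN (k + 22) with hcon | h; swap
            · exact h
            · exfalso
              exact pv_no_overlap kocc iocc (by omega)
                (by simp only [pvEnd]; simp; omega)
                (by simp [pvStart]) (by decide) pv_end_lt
          have hseg : pvSegWords 0 (s.take k) = 0 := by
            unfold pvSegWords
            rw [pv_take_no_start (fun j hj hjk => by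
              have := imin j
              rcases Nat.lt_or_ge j iN with h1 | h1
              · exact imin j h1 hj
              · omega)]
            simp
          have hshift : pvG s = pvG t := by
            rw [ht]
            apply pv_G_drop s (k + 22) h22
            intro j hj
            exact imin j (by omega)
          rw [hshift, hIH, hseg]
          simp
    · -- no end marker at all: B counts nothing, and A finds no end
      have hsplit : pvSplitRec s = [s] := pv_splitRec_no hE
      rw [hsplit]
      simp only [List.dropLast, List.foldl_nil]
      by_cases hfind : PySem.Chars.find s pvStart = -1
      · exact pvG_zero₁ hfind
      · have hinn : 0 ≤ PySem.Chars.find s pvStart :=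
          (PySem.Chars.find_nonneg_iff s pvStart).mpr ((PySem.Chars.find_ne_neg_one_iff s pvStart).mp hfind)
        set iN := (PySem.Chars.find s pvStart).toNat with hiN
        have hfeq : PySem.Chars.find s pvStart = (iN : Int) := (Int.toNat_of_nonneg hinn).symm
        have hilen : iN ≤ s.length := by
          have := PySem.Chars.find_le_length s pvStart; omega
        apply pvG_zero₂
        rw [hfeq]
        apply pv_findFrom_neg hilen
        intro hinf
        exact hE (hinf.trans (List.drop_suffix iN s).isInfix)

lemma pv_aGo_eq_pvG (cs : List Char) (fuel pos : Nat) (n : Int)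
    (hpos : pos ≤ cs.length) (hfuel : cs.length - pos < fuel) :
    pvAGo cs fuel (pos : Int) n = n + pvG (cs.drop pos) := by
  induction fuel generalizing pos n with
  | zero => omega
  | succ f ih =>
    simp only [pvAGo]
    rw [PySem.Chars.findFrom_natCast cs pvStart pos hpos]
    by_cases h1 : PySem.Chars.find (cs.drop pos) pvStart = -1
    · rw [if_pos (by rw [h1]; simp)]
      rw [pvG_zero₁ h1]
      ring
    · have hinn : 0 ≤ PySem.Chars.find (cs.drop pos) pvStart :=
        (PySem.Chars.find_nonneg_iff _ _).mpr ((PySem.Chars.find_ne_neg_one_iff _ _).mp h1)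
      obtain ⟨iocc, imin⟩ := PySem.Chars.find_spec hinn
      set iN := (PySem.Chars.find (cs.drop pos) pvStart).toNat with hiN
      have hfeq : PySem.Chars.find (cs.drop pos) pvStart = (iN : Int) := (Int.toNat_of_nonneg hinn).symm
      have hilen : iN ≤ (cs.drop pos).length := by
        have := PySem.Chars.find_le_length (cs.drop pos) pvStart; omega
      have hilen' : pos + iN ≤ cs.length := by
        simp only [List.length_drop] at hilen; omega
      rw [hfeq]
      rw [if_neg (show ¬((iN : Int) = -1) by omega)]
      have hcast : ((pos : Int) + (iN : Int)) = ((pos + iN : Nat) : Int) := by push_cast; ring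
      rw [hcast]
      rw [if_neg (show ¬(((pos + iN : Nat) : Int) = -1) by omega)]
      rw [PySem.Chars.findFrom_natCast cs pvEnd (pos + iN) hilen']
      have hdd : cs.drop (pos + iN) = (cs.drop pos).drop iN := by
        rw [List.drop_drop]
      rw [hdd]
      by_cases h2 : PySem.Chars.find ((cs.drop pos).drop iN) pvEnd = -1
      · rw [if_pos h2]
        rw [if_pos rfl]
        have hz : pvG (cs.drop pos) = 0 := by
          apply pvG_zero₂
          rw [hfeq]
          rw [PySem.Chars.findFrom_natCast (cs.drop pos) pvEnd iN hilen]
          rw [if_pos h2]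
        rw [hz]; ring
      · have hjnn : 0 ≤ PySem.Chars.find ((cs.drop pos).drop iN) pvEnd :=
          (PySem.Chars.find_nonneg_iff _ _).mpr ((PySem.Chars.find_ne_neg_one_iff _ _).mp h2)
        obtain ⟨jocc, jmin⟩ := PySem.Chars.find_spec hjnn
        set jN := (PySem.Chars.find ((cs.drop pos).drop iN) pvEnd).toNat with hjN
        have hjeq : PySem.Chars.find ((cs.drop pos).drop iN) pvEnd = (jN : Int) := (Int.toNat_of_nonneg hjnn).symm
        rw [if_neg h2, hjeq]
        rw [if_neg (show ¬(((pos + iN : Nat) : Int) + (jN : Int) = -1) by omega)]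
        -- the end-marker occurrence bounds the next position
        have hocc22 : pos + iN + jN + 22 ≤ cs.length := by
          have := jocc.length_le
          simp only [List.length_drop, pvEnd] at this
          have h22 : (22:Nat) ≤ cs.length - pos - iN - jN := by simpa using this
          omega
        have hcast2 : ((pos + iN : Nat) : Int) + (jN : Int) + 1 = ((pos + iN + jN + 1 : Nat) : Int) := by
          push_cast; ring
        rw [hcast2]
        rw [ih (pos + iN + jN + 1) _ (by omega) (by omega)]
        -- right-hand side takes a step
        have hstep : pvG (cs.drop pos) = ((PySem.Chars.split₀ (((cs.drop pos).drop iN).take jN)).length : Int)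
            + pvG ((cs.drop pos).drop (iN + jN + 1)) := by
          apply pvG_step hfeq
          rw [PySem.Chars.findFrom_natCast (cs.drop pos) pvEnd iN hilen]
          rw [if_neg h2, hjeq]
          push_cast; ring
        rw [hstep]
        have hchunk : PySem.List.slice cs (some ((pos + iN : Nat) : Int)) (some (((pos + iN : Nat) : Int) + (jN : Int)))
            = ((cs.drop pos).drop iN).take jN := by
          have : ((pos + iN : Nat) : Int) + (jN : Int) = ((pos + iN + jN : Nat) : Int) := by push_cast; ring
          rw [this, PySem.List.slice_natCast]
          rw [← hdd]
          congr 1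
          omega
        rw [hchunk]
        have htail : cs.drop (pos + iN + jN + 1) = (cs.drop pos).drop (iN + jN + 1) := by
          rw [List.drop_drop]; congr 1; omega
        rw [htail]
        ring


-- ===== VERDICT (by name: the statement is the Claim_ definition above) =====
theorem strategy_page_fence_word_count_spec : Claim_equal_strategy_page_fence_word_count := by
  intro body _
  unfold Spec_strategy_page_fence_word_count strategy_page_fence_word_count strategy_page_fence_word_count_alt
  rw [PySem.List.slice_to_neg_one, pv_splitOn_eq]
  have h := pv_aGo_eq_pvG body.toList (body.toList.length + 1) 0 0 (Nat.zero_le _) (by omega)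
  simp only [Nat.cast_zero, List.drop_zero, zero_add] at h
  rw [h]
  exact pv_main body.toList.length body.toList (le_refl _)
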